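-- pv_equiv track=rewrite | github.com/squareyun/study_algorithm | leetcode/261_graph-valid-tree.py | is_valid_tree
-- ===== SOURCE A (Python) =====
-- def is_valid_tree(n, edges):
--     root = [i for i in range(n)]
--
--     def find(x):
--         if root[x] != x:
--             root[x] = find(root[x])
--         return root[x]
--
--     def union(x, y):
--         rootX = find(x)
--         rootY = find(y)
--         if rootX != rootY:
--             root[rootY] = rootX
--
--     for e1, e2 in edges:
--         if find(e1) == find(e2):
--             return False    # 차례대로 노드를 연결하는 과정에서, 부모 노드가 동일하다면 사이클이 발생한 것
--         else:
--             union(e1, e2)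
--     return True
-- ===== SOURCE B (Python) =====
-- def is_valid_tree(n, edges):
--     comp = list(range(n))
--     for a, b in edges:
--         ca, cb = comp[a], comp[b]
--         if ca == cb:
--             return False
--         comp = [ca if c == cb else c for c in comp]
--     return True
-- ===== Notes on version B (the rewrite author's own statement) =====
-- stated objective: alternative
-- what changed: Replaces A's union-find (parent-pointer forest with recursive path-compressing find) by eager component relabelling (quick-find): a flat label list where each accepted edge rewrites every label of one endpoint's component in a single pass, so there is no recursion and no parent chains.
-- outside the precondition, e.g. on is_valid_tree(2, [(0, 0), (5, 5)]): A returns False, B returns False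
import Mathlib
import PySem

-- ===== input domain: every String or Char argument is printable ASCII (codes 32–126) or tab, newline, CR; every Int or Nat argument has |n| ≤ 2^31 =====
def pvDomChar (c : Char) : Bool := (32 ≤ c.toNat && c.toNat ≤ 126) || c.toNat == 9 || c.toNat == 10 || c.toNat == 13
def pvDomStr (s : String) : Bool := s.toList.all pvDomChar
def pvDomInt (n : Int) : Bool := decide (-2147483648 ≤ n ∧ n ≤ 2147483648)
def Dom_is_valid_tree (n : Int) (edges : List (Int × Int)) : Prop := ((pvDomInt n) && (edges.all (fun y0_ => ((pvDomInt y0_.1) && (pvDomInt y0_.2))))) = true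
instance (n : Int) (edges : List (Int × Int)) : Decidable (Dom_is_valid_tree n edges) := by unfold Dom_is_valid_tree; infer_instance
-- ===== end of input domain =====

-- B re-implements A's union-find cycle check as eager component relabelling ("quick-find"):
-- no parent forest, no recursive find — one label array rewritten per accepted edge.
-- Equivalence of the RETURN value is proved on Pre_ (all edge endpoints are legal Python indices into range(n)).

-- ===== PORT A =====
-- A's recursive `find` with path compression; `fuel` is a totality device only
-- (the parent chains are acyclic, so fuel `edges.length + 2` is never exhausted — see the Dec invariant below).
def pvFind : Nat → List Int → Int → Int × List Int
  | 0, root, x => (x, root)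
  | k+1, root, x =>
    let p := PySem.List.pyGetD root x 0          -- root[x]
    if p ≠ x then
      let res := pvFind k root p                 -- root[x] = find(root[x])
      (res.1, PySem.List.pySetD res.2 x res.1)
    else (x, root)

-- the `for e1, e2 in edges` loop of A, with `union` inlined exactly as written
def pvLoop (fuel : Nat) : List Int → List (Int × Int) → Bool
  | _, [] => true
  | root, (e1, e2) :: rest =>
    let f1 := pvFind fuel root e1
    let f2 := pvFind fuel f1.2 e2
    if f1.1 = f2.1 then false
    else
      -- union(e1, e2): rootX = find(e1); rootY = find(e2); if rootX != rootY: root[rootY] = rootX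
      let f3 := pvFind fuel f2.2 e1
      let f4 := pvFind fuel f3.2 e2
      pvLoop fuel (if f3.1 ≠ f4.1 then PySem.List.pySetD f4.2 f4.1 f3.1 else f4.2) rest

def is_valid_tree (n : Int) (edges : List (Int × Int)) : Bool :=
  pvLoop (edges.length + 2) (PySem.List.pyRange 0 n 1) edges

-- ===== PORT B =====
-- B keeps a direct component-label list `comp`; an accepted edge rewrites every label of b's component
def pvLoopB : List Int → List (Int × Int) → Bool
  | _, [] => true
  | comp, (a, b) :: rest =>
    let ca := PySem.List.pyGetD comp a 0
    let cb := PySem.List.pyGetD comp b 0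
    if ca = cb then false
    else pvLoopB (comp.map (fun c => if c = cb then ca else c)) rest

def is_valid_tree_alt (n : Int) (edges : List (Int × Int)) : Bool :=
  pvLoopB (PySem.List.pyRange 0 n 1) edges

-- ===== PRECONDITION & SPEC =====
-- Pre_ requires every listed edge endpoint to be a legal Python index into range(n); outside it A's
-- root[e] raises IndexError, except that A (and B alike) can still return False early when a cycle closes
-- before the first out-of-range edge is reached — A and B agree there too, but stating which prefix is
-- reached would mean re-simulating the loop, so those inputs stay outside Pre_.
def Pre_is_valid_tree (n : Int) (edges : List (Int × Int)) : Prop :=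
  ∀ p ∈ edges, (-n ≤ p.1 ∧ p.1 < n) ∧ (-n ≤ p.2 ∧ p.2 < n)
instance (n : Int) (edges : List (Int × Int)) : Decidable (Pre_is_valid_tree n edges) := by
  unfold Pre_is_valid_tree; infer_instance
def pvWitness_is_valid_tree : Int × (List (Int × Int)) := (4, [(0, 1), (1, 2), (-1, 2)])

def Spec_is_valid_tree (n : Int) (edges : List (Int × Int)) (out : Bool) : Prop := out = is_valid_tree_alt n edges
instance (n : Int) (edges : List (Int × Int)) (out : Bool) : Decidable (Spec_is_valid_tree n edges out) := by unfold Spec_is_valid_tree; infer_instance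

-- ===== CLAIM (what is proved, stated in full; the proofs are below) =====
def Claim_equal_is_valid_tree : Prop := ∀ (n : Int) (edges : List (Int × Int)), Dom_is_valid_tree n edges → Pre_is_valid_tree n edges → Spec_is_valid_tree n edges (is_valid_tree n edges)

-- ===== LEMMAS AND PROOFS =====

-- the list slot Python's wraparound indexing addresses, for an in-range index
def pvSlot (L : Nat) (x : Int) : Nat := if x < 0 then (x + L).toNat else x.toNat

theorem pvSlot_lt {L : Nat} {x : Int} (h1 : -(L:Int) ≤ x) (h2 : x < L) : pvSlot L x < L := by
  unfold pvSlot; split <;> omega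

theorem pvSlot_nonneg {L : Nat} {x : Int} (h0 : 0 ≤ x) : pvSlot L x = x.toNat := by
  unfold pvSlot; split <;> omega

theorem getD_slot (l : List Int) (x : Int) (h1 : -(l.length:Int) ≤ x) (h2 : x < l.length) :
    PySem.List.pyGetD l x 0 = l.getD (pvSlot l.length x) 0 := by
  unfold pvSlot; split
  · have hx : x = -(((-x).toNat : Nat) : Int) := by omega
    rw [hx, PySem.List.pyGetD_neg_natCast l (-x).toNat 0 (by omega) (by omega)]
    rw [List.getD_eq_getElem _ _ (by omega)]
    congr 1; omega
  · rw [PySem.List.pyGetD_eq_getElem l 0 (by omega) h2]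
    rw [List.getD_eq_getElem _ _ (by omega)]

theorem setD_slot (l : List Int) (x v : Int) (h1 : -(l.length:Int) ≤ x) (h2 : x < l.length) :
    PySem.List.pySetD l x v = l.set (pvSlot l.length x) v := by
  simp only [PySem.List.pySetD, PySem.List.pySet?, PySem.List.pyIdx?]
  unfold pvSlot
  by_cases hx : x < 0
  · rw [if_neg (by omega), if_pos (by omega), if_pos hx]
    simp only [Option.map_some, Option.getD_some]
    congr 1; omega
  · rw [if_pos (by omega), if_pos (by omega), if_neg hx]
    simp only [Option.map_some, Option.getD_some]

theorem getD_set (l : List Int) (j i : Nat) (v : Int) :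
    (l.set j v).getD i 0 = if j = i ∧ j < l.length then v else l.getD i 0 := by
  by_cases hi : i < l.length
  · rw [List.getD_eq_getElem _ _ (by simpa using hi), List.getElem_set]
    split <;> rename_i h
    · rw [if_pos ⟨h, h ▸ hi⟩]
    · rw [if_neg (by tauto), List.getD_eq_getElem _ _ hi]
  · have h1 : (l.set j v).getD i 0 = 0 := List.getD_eq_default _ _ (by simpa using hi)
    have h2 : l.getD i 0 = 0 := List.getD_eq_default _ _ (by omega)
    rw [h1, h2]
    split <;> rename_i h
    · omega
    · rfl

theorem getD_map (l : List Int) (f : Int → Int) (i : Nat) (h : i < l.length) :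
    (l.map f).getD i 0 = f (l.getD i 0) := by
  rw [List.getD_eq_getElem _ _ (by simpa using h), List.getElem_map, List.getD_eq_getElem _ _ h]

-- structural invariant relating A's parent list `root` to B's label list `comp`:
-- every node's direct parent has the same label, labels are fixed points of both lists, and roots carry their own label
def SInv (root comp : List Int) : Prop :=
  root.length = comp.length ∧
  ∀ i : Nat, i < root.length →
    (0 ≤ root.getD i 0 ∧ (root.getD i 0).toNat < root.length) ∧
    comp.getD (root.getD i 0).toNat 0 = comp.getD i 0 ∧
    (0 ≤ comp.getD i 0 ∧ (comp.getD i 0).toNat < root.length) ∧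
    comp.getD (comp.getD i 0).toNat 0 = comp.getD i 0 ∧
    root.getD (comp.getD i 0).toNat 0 = comp.getD i 0 ∧
    (root.getD i 0 = (i : Int) → comp.getD i 0 = (i : Int))

-- depth function witnessing that parent chains terminate (roots at depth 0)
def DecInv (d : Nat → Nat) (root : List Int) : Prop :=
  ∀ i : Nat, i < root.length →
    (root.getD i 0 = (i : Int) → d i = 0) ∧
    (root.getD i 0 ≠ (i : Int) → d (root.getD i 0).toNat < d i)

theorem setp (root comp : List Int) (d : Nat → Nat) (j : Nat)
    (hS : SInv root comp) (hD : DecInv d root) (hj : j < root.length) :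
    SInv (root.set j (comp.getD j 0)) comp ∧ DecInv d (root.set j (comp.getD j 0)) := by
  obtain ⟨hlen, hSa⟩ := hS
  obtain ⟨⟨hra, hrb⟩, hbj, ⟨hca, hcb⟩, hej, hdj, hfj⟩ := hSa j hj
  have hsget : ∀ i : Nat, (root.set j (comp.getD j 0)).getD i 0
      = if j = i then comp.getD j 0 else root.getD i 0 := by
    intro i; rw [getD_set]
    by_cases h : j = i
    · rw [if_pos ⟨h, hj⟩, if_pos h]
    · rw [if_neg (by tauto), if_neg h]
  constructor
  · refine ⟨by simpa using hlen, fun i hi => ?_⟩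
    rw [List.length_set] at hi
    obtain ⟨⟨hra', hrb'⟩, hbi, ⟨hca', hcb'⟩, hei, hdi, hfi⟩ := hSa i hi
    simp only [List.length_set, hsget]
    by_cases hji : j = i
    · subst hji
      have hjj : (if j = j then comp.getD j 0 else root.getD j 0) = comp.getD j 0 := if_pos rfl
      rw [hjj]
      refine ⟨⟨hca, hcb⟩, hej, ⟨hca, hcb⟩, hej, ?_, fun h => h⟩
      by_cases h2 : j = (comp.getD j 0).toNat
      · rw [if_pos h2]
      · rw [if_neg h2]; exact hdj
    · rw [if_neg hji]
      refine ⟨⟨hra', hrb'⟩, hbi, ⟨hca', hcb'⟩, hei, ?_, hfi⟩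
      by_cases h2 : j = (comp.getD i 0).toNat
      · rw [if_pos h2]
        have : comp.getD j 0 = comp.getD i 0 := by rw [h2]; exact hei
        exact this
      · rw [if_neg h2]; exact hdi
  · intro i hi
    rw [List.length_set] at hi
    obtain ⟨hD1, hD2⟩ := hD i hi
    simp only [hsget]
    by_cases hji : j = i
    · subst hji
      have hjj : (if j = j then comp.getD j 0 else root.getD j 0) = comp.getD j 0 := if_pos rfl
      rw [hjj]
      constructor
      · intro h
        have h2 : (comp.getD j 0).toNat = j := by omega
        have h1 : root.getD j 0 = (j : Int) := by
          have hx := hdj; rw [h2] at hx; rw [hx, h]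
        exact (hD j hj).1 h1
      · intro h
        have hz : d (comp.getD j 0).toNat = 0 := by
          refine ((hD (comp.getD j 0).toNat hcb).1) ?_
          rw [hdj]; omega
        have hrj : root.getD j 0 ≠ (j : Int) := by
          intro hc
          exact h (hfj hc)
        have : d (root.getD j 0).toNat < d j := (hD j hj).2 hrj
        omega
    · rw [if_neg hji]
      exact ⟨hD1, hD2⟩

theorem find_ok (k : Nat) : ∀ (root comp : List Int) (d : Nat → Nat) (x : Int),
    SInv root comp → DecInv d root → 0 ≤ x → x < root.length → d x.toNat < k →
    (pvFind k root x).1 = comp.getD x.toNat 0 ∧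
    SInv (pvFind k root x).2 comp ∧ DecInv d (pvFind k root x).2 ∧
    (pvFind k root x).2.length = root.length := by
  induction k with
  | zero => intro root comp d x _ _ _ _ h; omega
  | succ k ih =>
    intro root comp d x hS hD hx0 hxL hdk
    have hxN : x.toNat < root.length := by omega
    have hp : PySem.List.pyGetD root x 0 = root.getD x.toNat 0 := by
      rw [getD_slot root x (by omega) hxL, pvSlot_nonneg hx0]
    obtain ⟨⟨hra, hrb⟩, hbx, _, _, _, hfx⟩ := hS.2 x.toNat hxN
    by_cases hpx : root.getD x.toNat 0 = x
    · have : pvFind (k+1) root x = (x, root) := by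
        simp only [pvFind, hp, hpx]
        simp
      rw [this]
      refine ⟨?_, hS, hD, rfl⟩
      have := hfx (by rw [hpx]; omega)
      omega
    · have hne : root.getD x.toNat 0 ≠ x := hpx
      have hpL : root.getD x.toNat 0 < (root.length : Int) := by omega
      have hdp : d (root.getD x.toNat 0).toNat < k := by
        have h2 := (hD x.toNat hxN).2 (by intro hc; exact hne (by omega))
        omega
      obtain ⟨ih1, ih2, ih3, ih4⟩ := ih root comp d (root.getD x.toNat 0) hS hD hra hpL hdp
      have hres : pvFind (k+1) root x
          = ((pvFind k root (root.getD x.toNat 0)).1,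
             PySem.List.pySetD (pvFind k root (root.getD x.toNat 0)).2 x
               (pvFind k root (root.getD x.toNat 0)).1) := by
        simp only [pvFind, hp]
        rw [if_pos hne]
      rw [hres]
      have hval : (pvFind k root (root.getD x.toNat 0)).1 = comp.getD x.toNat 0 := by
        rw [ih1, hbx]
      have hset : PySem.List.pySetD (pvFind k root (root.getD x.toNat 0)).2 x
            (pvFind k root (root.getD x.toNat 0)).1
          = (pvFind k root (root.getD x.toNat 0)).2.set x.toNat
            (comp.getD x.toNat 0) := by
        rw [hval, setD_slot _ x _ (by rw [ih4]; omega) (by rw [ih4]; exact_mod_cast hxL),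
          pvSlot_nonneg hx0]
      rw [hset]
      obtain ⟨hS', hD'⟩ := setp _ comp d x.toNat ih2 ih3 (by omega)
      exact ⟨hval, hS', hD', by rw [List.length_set, ih4]⟩

theorem find_any (F : Nat) (root comp : List Int) (d : Nat → Nat) (B : Nat) (x : Int)
    (hS : SInv root comp) (hD : DecInv d root)
    (hB : ∀ i, i < root.length → d i ≤ B) (hF : B + 2 ≤ F)
    (h1 : -(root.length:Int) ≤ x) (h2 : x < root.length) :
    (pvFind F root x).1 = comp.getD (pvSlot root.length x) 0 ∧
    SInv (pvFind F root x).2 comp ∧ DecInv d (pvFind F root x).2 ∧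
    (pvFind F root x).2.length = root.length := by
  by_cases hx : 0 ≤ x
  · rw [pvSlot_nonneg hx]
    exact find_ok F root comp d x hS hD hx h2 (by have := hB x.toNat (by omega); omega)
  · obtain ⟨k, rfl⟩ : ∃ k, F = k + 1 := ⟨F - 1, by omega⟩
    have hsl : pvSlot root.length x < root.length := pvSlot_lt h1 h2
    have hp : PySem.List.pyGetD root x 0 = root.getD (pvSlot root.length x) 0 :=
      getD_slot root x h1 h2
    obtain ⟨⟨hra, hrb⟩, hbx, _, _, _, _⟩ := hS.2 (pvSlot root.length x) hsl
    set p := root.getD (pvSlot root.length x) 0 with hpdef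
    have hne : p ≠ x := by omega
    have hdp : d p.toNat < k := by have := hB p.toNat hrb; omega
    obtain ⟨ih1, ih2, ih3, ih4⟩ := find_ok k root comp d p hS hD hra (by omega) hdp
    have hres : pvFind (k+1) root x
        = ((pvFind k root p).1, PySem.List.pySetD (pvFind k root p).2 x (pvFind k root p).1) := by
      simp only [pvFind, hp]
      rw [if_pos hne]
    rw [hres]
    have hval : (pvFind k root p).1 = comp.getD (pvSlot root.length x) 0 := by rw [ih1, hbx]
    have hset : PySem.List.pySetD (pvFind k root p).2 x (pvFind k root p).1
        = (pvFind k root p).2.set (pvSlot root.length x) (comp.getD (pvSlot root.length x) 0) := by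
      rw [hval, setD_slot _ x _ (by rw [ih4]; omega) (by rw [ih4]; exact_mod_cast h2)]
      rw [ih4]
    rw [hset]
    obtain ⟨hS', hD'⟩ := setp _ comp d (pvSlot root.length x) ih2 ih3 (by omega)
    exact ⟨hval, hS', hD', by rw [List.length_set, ih4]⟩

theorem unionp (root comp : List Int) (d : Nat → Nat) (ca cb : Int)
    (hS : SInv root comp) (hD : DecInv d root)
    (ha : 0 ≤ ca ∧ ca.toNat < root.length ∧ comp.getD ca.toNat 0 = ca ∧ root.getD ca.toNat 0 = ca)
    (hb : 0 ≤ cb ∧ cb.toNat < root.length ∧ comp.getD cb.toNat 0 = cb ∧ root.getD cb.toNat 0 = cb)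
    (hne : ca ≠ cb) :
    SInv (root.set cb.toNat ca) (comp.map (fun c => if c = cb then ca else c)) ∧
    DecInv (fun i => if comp.getD i 0 = cb then d i + 1 else d i) (root.set cb.toNat ca) := by
  obtain ⟨hlen, hSa⟩ := hS
  obtain ⟨ha0, haL, hae, had⟩ := ha
  obtain ⟨hb0, hbL, hbe, hbd⟩ := hb
  have htnne : cb.toNat ≠ ca.toNat := by omega
  have hmap : ∀ i : Nat, i < root.length →
      (comp.map fun c => if c = cb then ca else c).getD i 0
        = (if comp.getD i 0 = cb then ca else comp.getD i 0) := by
    intro i hi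
    exact getD_map comp _ i (by omega)
  have hs : ∀ i : Nat, (root.set cb.toNat ca).getD i 0
      = if cb.toNat = i then ca else root.getD i 0 := by
    intro i; rw [getD_set]
    by_cases h : cb.toNat = i
    · rw [if_pos ⟨h, hbL⟩, if_pos h]
    · rw [if_neg (by tauto), if_neg h]
  constructor
  · refine ⟨by simp [hlen], fun i hi => ?_⟩
    rw [List.length_set] at hi
    obtain ⟨⟨hr0, hr1⟩, hbi, ⟨hc0, hc1⟩, hei, hdi, hfi⟩ := hSa i hi
    simp only [List.length_set, hs i, hmap i hi]
    by_cases hicb : cb.toNat = i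
    · have hci : comp.getD i 0 = cb := by rw [← hicb]; exact hbe
      rw [if_pos hicb, if_pos hci]
      refine ⟨⟨ha0, haL⟩, ?_, ⟨ha0, haL⟩, ?_, ?_, fun h => h⟩
      · rw [hmap ca.toNat haL, hae, if_neg hne]
      · rw [hmap ca.toNat haL, hae, if_neg hne]
      · rw [hs ca.toNat, if_neg (fun hc => htnne hc), had]
    · rw [if_neg hicb]
      by_cases hci : comp.getD i 0 = cb
      · rw [if_pos hci]
        refine ⟨⟨hr0, hr1⟩, ?_, ⟨ha0, haL⟩, ?_, ?_, ?_⟩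
        · rw [hmap (root.getD i 0).toNat hr1, hbi, if_pos hci]
        · rw [hmap ca.toNat haL, hae, if_neg hne]
        · rw [hs ca.toNat, if_neg (fun hc => htnne hc), had]
        · intro h
          have h2 := hfi h
          exact absurd (show cb.toNat = i by omega) hicb
      · rw [if_neg hci]
        refine ⟨⟨hr0, hr1⟩, ?_, ⟨hc0, hc1⟩, ?_, ?_, hfi⟩
        · rw [hmap (root.getD i 0).toNat hr1, hbi, if_neg hci]
        · rw [hmap (comp.getD i 0).toNat hc1, hei, if_neg hci]
        · rw [hs (comp.getD i 0).toNat, if_neg (show ¬cb.toNat = (comp.getD i 0).toNat by omega), hdi]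
  · intro i hi
    rw [List.length_set] at hi
    obtain ⟨⟨hr0, hr1⟩, hbi, ⟨hc0, hc1⟩, hei, hdi, hfi⟩ := hSa i hi
    dsimp only
    rw [hs i]
    by_cases hicb : cb.toNat = i
    · have hci : comp.getD i 0 = cb := by rw [← hicb]; exact hbe
      rw [if_pos hicb]
      constructor
      · intro h
        exact absurd (show ca = cb by omega) hne
      · intro _
        have hz : d ca.toNat = 0 := (hD ca.toNat haL).1 (by rw [had]; omega)
        rw [hae, if_neg hne, if_pos hci]
        omega
    · rw [if_neg hicb]
      constructor
      · intro h
        have h0 := (hD i hi).1 h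
        have hcii := hfi h
        rw [if_neg (show ¬comp.getD i 0 = cb by intro hc; exact hicb (by omega))]
        exact h0
      · intro h
        have h2 := (hD i hi).2 h
        rw [hbi]
        by_cases hci : comp.getD i 0 = cb
        · rw [if_pos hci, if_pos hci]; omega
        · rw [if_neg hci, if_neg hci]; exact h2

theorem loop_eq (edges : List (Int × Int)) : ∀ (F : Nat) (root comp : List Int) (d : Nat → Nat) (B : Nat),
    SInv root comp → DecInv d root → (∀ i, i < root.length → d i ≤ B) →
    B + edges.length + 2 ≤ F →
    (∀ p ∈ edges, (-(root.length:Int) ≤ p.1 ∧ p.1 < root.length) ∧ (-(root.length:Int) ≤ p.2 ∧ p.2 < root.length)) →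
    pvLoop F root edges = pvLoopB comp edges := by
  induction edges with
  | nil =>
    intro F root comp d B _ _ _ _ _
    simp [pvLoop, pvLoopB]
  | cons p rest ih =>
    obtain ⟨a, b⟩ := p
    intro F root comp d B hS hD hB hF hmem
    have hlen := hS.1
    have hma := (hmem (a, b) (List.mem_cons_self)).1
    have hmb := (hmem (a, b) (List.mem_cons_self)).2
    obtain ⟨h1v, h1S, h1D, h1L⟩ :=
      find_any F root comp d B a hS hD hB (by omega) hma.1 hma.2
    obtain ⟨h2v, h2S, h2D, h2L⟩ :=
      find_any F (pvFind F root a).2 comp d B b h1S h1D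
        (fun i hi => hB i (by omega)) (by omega)
        (by rw [h1L]; exact hmb.1) (by rw [h1L]; exact hmb.2)
    rw [h1L] at h2v
    have hcomp_a : PySem.List.pyGetD comp a 0 = comp.getD (pvSlot root.length a) 0 := by
      rw [getD_slot comp a (by omega) (by omega), hlen]
    have hcomp_b : PySem.List.pyGetD comp b 0 = comp.getD (pvSlot root.length b) 0 := by
      rw [getD_slot comp b (by omega) (by omega), hlen]
    by_cases hcc : comp.getD (pvSlot root.length a) 0 = comp.getD (pvSlot root.length b) 0
    · simp only [pvLoop, pvLoopB, hcomp_a, hcomp_b, h1v, h2v]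
      rw [if_pos hcc, if_pos hcc]
    · obtain ⟨h3v, h3S, h3D, h3L⟩ :=
        find_any F (pvFind F (pvFind F root a).2 b).2 comp d B a h2S h2D
          (fun i hi => hB i (by omega)) (by omega)
          (by rw [h2L, h1L]; exact hma.1) (by rw [h2L, h1L]; exact hma.2)
      rw [h2L, h1L] at h3v
      obtain ⟨h4v, h4S, h4D, h4L⟩ :=
        find_any F (pvFind F (pvFind F (pvFind F root a).2 b).2 a).2 comp d B b h3S h3D
          (fun i hi => hB i (by omega)) (by omega)
          (by rw [h3L, h2L, h1L]; exact hmb.1) (by rw [h3L, h2L, h1L]; exact hmb.2)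
      rw [h3L, h2L, h1L] at h4v
      have hLa : pvSlot root.length a < root.length := pvSlot_lt hma.1 hma.2
      have hLb : pvSlot root.length b < root.length := pvSlot_lt hmb.1 hmb.2
      have hL4 : (pvFind F (pvFind F (pvFind F (pvFind F root a).2 b).2 a).2 b).2.length
          = root.length := by rw [h4L, h3L, h2L, h1L]
      obtain ⟨_, _, ⟨hca0, hcaL⟩, hcae, hcad, _⟩ := h4S.2 (pvSlot root.length a) (by omega)
      obtain ⟨_, _, ⟨hcb0, hcbL⟩, hcbe, hcbd, _⟩ := h4S.2 (pvSlot root.length b) (by omega)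
      have hset : PySem.List.pySetD (pvFind F (pvFind F (pvFind F (pvFind F root a).2 b).2 a).2 b).2
            (comp.getD (pvSlot root.length b) 0) (comp.getD (pvSlot root.length a) 0)
          = (pvFind F (pvFind F (pvFind F (pvFind F root a).2 b).2 a).2 b).2.set
            (comp.getD (pvSlot root.length b) 0).toNat (comp.getD (pvSlot root.length a) 0) := by
        rw [setD_slot _ _ _ (by omega) (by omega), pvSlot_nonneg hcb0]
      obtain ⟨hS5, hD5⟩ :=
        unionp (pvFind F (pvFind F (pvFind F (pvFind F root a).2 b).2 a).2 b).2 comp d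
          (comp.getD (pvSlot root.length a) 0) (comp.getD (pvSlot root.length b) 0)
          h4S h4D ⟨hca0, hcaL, hcae, hcad⟩ ⟨hcb0, hcbL, hcbe, hcbd⟩ hcc
      have hrec := ih F _ _ _ (B + 1) hS5 hD5
        (by
          intro i hi
          have := hB i (by simp only [List.length_set] at hi; omega)
          split <;> omega)
        (by simp only [List.length_cons] at hF; omega)
        (by
          intro q hq
          have := hmem q (List.mem_cons_of_mem _ hq)
          simp only [List.length_set, hL4]
          exact this)
      simp only [pvLoop, pvLoopB, hcomp_a, hcomp_b, h1v, h2v, h3v, h4v]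
      rw [if_neg hcc, if_neg hcc, if_pos hcc, hset]
      exact hrec

-- ===== VERDICT (by name: the statement is the Claim_ definition above) =====
theorem is_valid_tree_spec : Claim_equal_is_valid_tree := by
  intro n edges _ hPre
  unfold Spec_is_valid_tree is_valid_tree is_valid_tree_alt
  have hL : (PySem.List.pyRange 0 n 1).length = n.toNat := by
    rw [PySem.List.length_pyRange_one]; omega
  have hget : ∀ i : Nat, i < (PySem.List.pyRange 0 n 1).length →
      (PySem.List.pyRange 0 n 1).getD i 0 = (i : Int) := by
    intro i hi
    rw [List.getD_eq_getElem _ _ hi, PySem.List.getElem_pyRange_one _ _ _ hi]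
    omega
  apply loop_eq edges (edges.length + 2) _ _ (fun _ => 0) 0
  · refine ⟨rfl, fun i hi => ?_⟩
    have hg := hget i hi
    have ht : ((i:Int)).toNat = i := by omega
    simp only [hg, ht]
    exact ⟨⟨by omega, hi⟩, trivial, ⟨by omega, hi⟩, trivial, trivial, fun _ => trivial⟩
  · intro i hi
    refine ⟨fun _ => rfl, fun h => ?_⟩
    exact absurd (hget i hi) h
  · intro i _; omega
  · omega
  · intro p hp
    have := hPre p hp
    rw [hL]
    omega
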